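-- pv_equiv track=rewrite | github.com/hanesyo/Amharic-transliterator | mt_transliterator.py | apply_prefix_apostrophe_rules
-- ===== SOURCE A (Python) =====
-- PREFIXES_WITH_APOSTROPHE = ['le', 'ye', 'be', 'ke', 'ma', 'me', 'e', 'a', 'te', 's', 'en', 'ya', 'y']
--
-- def apply_prefix_apostrophe_rules(word):
--     """Apply prefix apostrophe rules to a word."""
--     if not word:
--         return word
--
--     # Check if word starts with any of the specified prefixes
--     # Sort prefixes by length (longest first) to avoid partial matches
--     sorted_prefixes = sorted(PREFIXES_WITH_APOSTROPHE, key=len, reverse=True)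
--
--     for prefix in sorted_prefixes:
--         if word.startswith(prefix) and len(word) > len(prefix):
--             # Make sure the prefix is actually a complete prefix (not part of a longer word)
--             rest_of_word = word[len(prefix):]
--             if rest_of_word:  # There must be something after the prefix
--                 # Add apostrophe after the prefix
--                 new_word = prefix + "'" + rest_of_word
--
--                 # Check if there's an 'i' right after the apostrophe that should be deleted
--                 # The 'i' should be deleted if it's not the first letter in the original word
--                 if (len(rest_of_word) > 0 and
--                     rest_of_word[0] == 'i' and
--                     len(prefix) > 0):  # Ensure the 'i' is not the first letter
--                     # Delete the 'i'
--                     new_word = prefix + "'" + rest_of_word[1:]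
--
--                 return new_word
--
--     return word
-- ===== SOURCE B (Python) =====
-- def apply_prefix_apostrophe_rules(word):
--     """Apply prefix apostrophe rules to a word."""
--     if not word:
--         return word
--     c0 = word[0]
--     # Hard-coded decision tree (inlined trie) over the first one or two
--     # characters: no prefix list, no sorting, no scan.
--     if len(word) > 2 and (
--         (word[1] == 'e' and c0 in 'lybkmt') or
--         (word[1] == 'a' and c0 in 'my') or
--         (word[1] == 'n' and c0 == 'e')):
--         n = 2
--     elif len(word) > 1 and c0 in 'easy':
--         n = 1
--     else:
--         return word
--     tail = word[n + 1:] if word[n] == 'i' else word[n:]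
--     return word[:n] + "'" + tail
-- ===== Notes on version B (the rewrite author's own statement) =====
-- stated objective: alternative
-- what changed: A sorts the 13-entry prefix list by length and linearly scans it with startswith; B has no prefix list at all: it decides the match with a hard-coded decision tree (inlined trie) over the first one or two characters and then builds the result from slices.
import Mathlib
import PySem

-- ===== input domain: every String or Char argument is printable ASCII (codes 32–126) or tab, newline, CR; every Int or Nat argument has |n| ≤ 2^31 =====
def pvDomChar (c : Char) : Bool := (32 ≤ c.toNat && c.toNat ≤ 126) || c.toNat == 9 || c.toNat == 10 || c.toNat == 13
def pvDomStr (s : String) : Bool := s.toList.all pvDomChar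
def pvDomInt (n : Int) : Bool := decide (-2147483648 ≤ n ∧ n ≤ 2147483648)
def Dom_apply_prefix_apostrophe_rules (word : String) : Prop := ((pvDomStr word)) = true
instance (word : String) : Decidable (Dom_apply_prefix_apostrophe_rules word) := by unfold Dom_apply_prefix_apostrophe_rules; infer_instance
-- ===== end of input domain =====

-- B replaces A's sort-then-scan over the 13-entry prefix list by a hard-coded
-- decision tree over the first one or two characters (no prefix list at all);
-- objective: alternative.

-- ===== PORT A =====
-- PREFIXES_WITH_APOSTROPHE, as lists of code points
def pvPrefixesA : List (List Char) :=
  [['l','e'], ['y','e'], ['b','e'], ['k','e'], ['m','a'], ['m','e'],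
   ['e'], ['a'], ['t','e'], ['s'], ['e','n'], ['y','a'], ['y']]

-- the 'for prefix in sorted_prefixes' loop of A (continue = recurse on the tail)
def pvALoop (word : List Char) : List (List Char) → List Char
  | [] => word
  | p :: ps =>
    if PySem.Chars.startswith word p && decide (PySem.Chars.len word > PySem.Chars.len p) then
      let rest_of_word := PySem.Chars.slice word (some (PySem.Chars.len p : Int)) none
      if rest_of_word ≠ [] then
        let new_word := p ++ '\'' :: rest_of_word
        if decide (0 < rest_of_word.length) && (PySem.List.pyGet? rest_of_word 0 == some 'i')
            && decide (0 < p.length) then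
          p ++ '\'' :: PySem.Chars.slice rest_of_word (some 1) none
        else new_word
      else pvALoop word ps
    else pvALoop word ps

def apply_prefix_apostrophe_rules (word : String) : String :=
  if word.toList = [] then word
  else
    let sorted_prefixes :=
      PySem.List.sorted pvPrefixesA (key := fun p => PySem.Chars.len p) (reverse := true)
    String.ofList (pvALoop word.toList sorted_prefixes)

-- ===== PORT B =====
-- 'len(word) > 2 and ((word[1] == 'e' and c0 in 'lybkmt') or …)': the 2-char decision tree
def pvBDecide2 (w : List Char) (c0 : Char) : Bool :=
  (PySem.List.pyGet? w 1 == some 'e' && List.contains ['l','y','b','k','m','t'] c0) ||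
  (PySem.List.pyGet? w 1 == some 'a' && List.contains ['m','y'] c0) ||
  (PySem.List.pyGet? w 1 == some 'n' && c0 == 'e')

-- the body after the empty guard; c0 = word[0]
def pvBCore (w : List Char) (c0 : Char) : List Char :=
  let n? : Option Nat :=
    if decide (2 < w.length) && pvBDecide2 w c0 then some 2
    else if decide (1 < w.length) && List.contains ['e','a','s','y'] c0 then some 1
    else none
  match n? with
  | none => w
  | some n =>
    let tail := if PySem.List.pyGet? w (n : Int) == some 'i'
                then PySem.List.slice w (some ((n : Int) + 1)) none
                else PySem.List.slice w (some (n : Int)) none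
    PySem.List.slice w none (some (n : Int)) ++ '\'' :: tail

def apply_prefix_apostrophe_rules_alt (word : String) : String :=
  match word.toList with
  | [] => word
  | c0 :: t => String.ofList (pvBCore (c0 :: t) c0)

-- ===== PRECONDITION & SPEC =====
def Spec_apply_prefix_apostrophe_rules (word : String) (out : String) : Prop := out = apply_prefix_apostrophe_rules_alt word
instance (word : String) (out : String) : Decidable (Spec_apply_prefix_apostrophe_rules word out) := by unfold Spec_apply_prefix_apostrophe_rules; infer_instance

-- ===== CLAIM (what is proved, stated in full; the proofs are below) =====
def Claim_equal_apply_prefix_apostrophe_rules : Prop := ∀ (word : String), Dom_apply_prefix_apostrophe_rules word → Spec_apply_prefix_apostrophe_rules word (apply_prefix_apostrophe_rules word)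

-- ===== LEMMAS AND PROOFS =====

-- A's sorted() evaluates to the concrete longest-first (stable) order
theorem pvSorted_eval :
    PySem.List.sorted pvPrefixesA (key := fun p => PySem.Chars.len p) (reverse := true) =
      [['l','e'], ['y','e'], ['b','e'], ['k','e'], ['m','a'], ['m','e'],
       ['t','e'], ['e','n'], ['y','a'], ['e'], ['a'], ['s'], ['y']] := by decide

-- what one successful iteration of A's loop returns, for prefix length n
def pvStep (word : List Char) (n : Nat) : List Char :=
  let r := word.drop n
  word.take n ++ '\'' :: (if PySem.List.pyGet? r 0 == some 'i' then r.drop 1 else r)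

-- A's scan over a block of prefixes of common length n equals one membership test
theorem pvALoop_uniform (word : List Char) (n : Nat) (hn : 0 < n)
    (ps qs : List (List Char)) (h : ∀ p ∈ ps, p.length = n) :
    pvALoop word (ps ++ qs) =
      if decide ((word.length : Int) > (n : Int)) && List.contains ps (word.take n)
      then pvStep word n else pvALoop word qs := by
  induction ps with
  | nil => simp only [List.nil_append, List.contains_nil, Bool.and_false, Bool.false_eq_true, if_false]
  | cons p ps ih =>
    have hp : p.length = n := h p (by simp)
    have hps : ∀ q ∈ ps, q.length = n := fun q hq => h q (by simp [hq])
    by_cases hlen : n < word.length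
    · have hlen' : ((word.length : Int) > (n : Int)) := by exact_mod_cast hlen
      by_cases heq : word.take n = p
      · have hsw : PySem.Chars.startswith word p = true := by
          rw [PySem.Chars.startswith_iff, ← heq]
          exact List.take_prefix n word
        have hrest : PySem.Chars.slice word (some (n : Int)) none = word.drop n := by
          simp [PySem.Chars.slice_eq_listSlice, PySem.List.slice_from_natCast]
        have hlenr : 0 < (word.drop n).length := by
          have := List.length_drop (l := word) (i := n); omega
        have hdropne : word.drop n ≠ [] := by
          intro hc; rw [hc] at hlenr; simp at hlenr
        have hslice1 : PySem.List.slice (word.drop n) (some 1) none = List.drop 1 (word.drop n) := by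
          simpa using PySem.List.slice_from_natCast (word.drop n) 1
        have hcont : List.contains (p :: ps) (word.take n) = true := by
          simp only [List.contains_cons, heq, beq_self_eq_true, Bool.true_or]
        have hcondR : (decide ((word.length : Int) > (n : Int))
            && List.contains (p :: ps) (word.take n)) = true := by
          rw [hcont, Bool.and_true, decide_eq_true_eq]
          exact hlen'
        simp only [List.cons_append, pvALoop, PySem.Chars.len_eq, hp, hsw, Bool.true_and,
          decide_eq_true_eq, hrest]
        rw [if_pos hlen']
        rw [if_pos hdropne]
        simp only [hlenr, decide_true, Bool.true_and, hn, Bool.and_true]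
        rw [if_pos hcondR]
        simp only [pvStep, ← heq]
        by_cases hi : PySem.List.pyGet? (word.drop n) 0 == some 'i'
        · simp [hi, hslice1]
        · simp [hi]
      · have hswf : PySem.Chars.startswith word p = false := by
          by_contra h1
          rw [Bool.not_eq_false, PySem.Chars.startswith_iff] at h1
          have h2 := List.prefix_iff_eq_take.mp h1
          rw [hp] at h2
          exact heq h2.symm
        have hne : (word.take n == p) = false := by
          simpa using heq
        simp only [List.cons_append, pvALoop, hswf, Bool.false_and, Bool.false_eq_true,
          if_false]
        rw [ih hps, List.contains_cons, hne, Bool.false_or]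
    · have hlen' : ¬ ((word.length : Int) > (n : Int)) := by exact_mod_cast hlen
      have hcond : (PySem.Chars.startswith word p &&
          decide (PySem.Chars.len word > PySem.Chars.len p)) = false := by
        simp only [PySem.Chars.len_eq, hp]
        simp [hlen']
      simp only [List.cons_append, pvALoop, hcond, Bool.false_eq_true, if_false]
      rw [ih hps]
      simp [hlen']

-- look-ups of word[0]/word[1]/word[2] in head?-form
theorem pvGet0 (t : List Char) : PySem.List.pyGet? t 0 = t.head? := by
  have h : (0:Int) = ((0:Nat):Int) := by norm_num
  rw [h, PySem.List.pyGet?_natCast]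
  simp [List.head?_eq_getElem?]

theorem pvGet1 (c0 : Char) (t : List Char) :
    PySem.List.pyGet? (c0 :: t) 1 = t.head? := by
  have h : (1:Int) = ((1:Nat):Int) := by norm_num
  rw [h, PySem.List.pyGet?_natCast]
  simp [List.head?_eq_getElem?]

-- membership of the 2-character slice in A's nine pairs IS B's decision tree
theorem pvContains2 (c0 c1 : Char) :
    List.contains [['l','e'], ['y','e'], ['b','e'], ['k','e'], ['m','a'], ['m','e'],
       ['t','e'], ['e','n'], ['y','a']] ([c0, c1] : List Char) =
      ((c1 == 'e' && List.contains ['l','y','b','k','m','t'] c0) ||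
       (c1 == 'a' && List.contains ['m','y'] c0) ||
       (c1 == 'n' && c0 == 'e')) := by
  simp only [List.contains_cons, List.contains_nil, List.cons_beq_cons, beq_self_eq_true,
    Bool.and_true, Bool.or_false]
  generalize (c0 == 'l') = b1
  generalize (c0 == 'y') = b2
  generalize (c0 == 'b') = b3
  generalize (c0 == 'k') = b4
  generalize (c0 == 'm') = b5
  generalize (c0 == 't') = b6
  generalize (c0 == 'e') = b7
  generalize (c1 == 'e') = a1
  generalize (c1 == 'a') = a2
  generalize (c1 == 'n') = a3
  revert b1 b2 b3 b4 b5 b6 b7 a1 a2 a3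
  decide

-- membership of the 1-character slice in A's four singletons IS a character class
theorem pvContains1 (c0 : Char) :
    List.contains [['e'], ['a'], ['s'], ['y']] ([c0] : List Char) =
      List.contains ['e','a','s','y'] c0 := by
  simp only [List.contains_cons, List.contains_nil, List.cons_beq_cons, beq_self_eq_true,
    Bool.and_true, Bool.or_false]

-- B's tail computation, parameterised by the slice length
def pvBStep (w : List Char) (n : Nat) : List Char :=
  if PySem.List.pyGet? w ((n:Nat) : Int) == some 'i'
  then PySem.List.slice w (some (((n:Nat) : Int) + 1)) none
  else PySem.List.slice w (some ((n:Nat) : Int)) none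

-- pvBCore as a chain of ifs
theorem pvBCore_ite (w : List Char) (c0 : Char) :
    pvBCore w c0 =
      if decide (2 < w.length) && pvBDecide2 w c0 then
        PySem.List.slice w none (some ((2:Nat) : Int)) ++ '\'' :: pvBStep w 2
      else if decide (1 < w.length) && List.contains ['e','a','s','y'] c0 then
        PySem.List.slice w none (some ((1:Nat) : Int)) ++ '\'' :: pvBStep w 1
      else w := by
  unfold pvBCore pvBStep
  cases hc2 : (decide (2 < w.length) && pvBDecide2 w c0) <;>
    cases hc1 : (decide (1 < w.length) && List.contains ['e','a','s','y'] c0) <;>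
      simp

-- A's step and B's branch coincide for slice length 2 …
theorem pvStep2_eq (c0 c1 : Char) (t2 : List Char) :
    pvStep (c0 :: c1 :: t2) 2 =
      PySem.List.slice (c0 :: c1 :: t2) none (some ((2:Nat) : Int)) ++ '\'' ::
        pvBStep (c0 :: c1 :: t2) 2 := by
  unfold pvStep pvBStep
  rw [PySem.List.slice_to_natCast]
  have h3 : (((2:Nat):Int) + 1) = ((3:Nat):Int) := by norm_num
  rw [h3, PySem.List.slice_from_natCast, PySem.List.slice_from_natCast,
    PySem.List.pyGet?_natCast]
  simp [pvGet0, List.head?_eq_getElem?]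

-- … and for slice length 1
theorem pvStep1_eq (c0 c1 : Char) (t2 : List Char) :
    pvStep (c0 :: c1 :: t2) 1 =
      PySem.List.slice (c0 :: c1 :: t2) none (some ((1:Nat) : Int)) ++ '\'' ::
        pvBStep (c0 :: c1 :: t2) 1 := by
  unfold pvStep pvBStep
  rw [PySem.List.slice_to_natCast]
  have h2 : (((1:Nat):Int) + 1) = ((2:Nat):Int) := by norm_num
  rw [h2, PySem.List.slice_from_natCast, PySem.List.slice_from_natCast,
    PySem.List.pyGet?_natCast]
  simp

theorem pvALoop_nil (w : List Char) : pvALoop w [] = w := rfl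

-- the loop-level equivalence, for a nonempty word
theorem pvCore_eq (c0 : Char) (t : List Char) :
    pvALoop (c0 :: t)
      (PySem.List.sorted pvPrefixesA (key := fun p => PySem.Chars.len p) (reverse := true)) =
    pvBCore (c0 :: t) c0 := by
  rw [pvSorted_eval]
  rw [show ([['l','e'], ['y','e'], ['b','e'], ['k','e'], ['m','a'], ['m','e'],
       ['t','e'], ['e','n'], ['y','a'], ['e'], ['a'], ['s'], ['y']] : List (List Char)) =
      ([['l','e'], ['y','e'], ['b','e'], ['k','e'], ['m','a'], ['m','e'],
       ['t','e'], ['e','n'], ['y','a']] ++ [['e'], ['a'], ['s'], ['y']]) from rfl]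
  rw [pvALoop_uniform (c0 :: t) 2 (by norm_num) _ _ (by intro p hp; fin_cases hp <;> rfl)]
  rw [show ([['e'], ['a'], ['s'], ['y']] : List (List Char))
      = ([['e'], ['a'], ['s'], ['y']] ++ []) from rfl]
  rw [pvALoop_uniform (c0 :: t) 1 (by norm_num) _ _ (by intro p hp; fin_cases hp <;> rfl)]
  rw [pvALoop_nil, pvBCore_ite]
  -- the Int-cast length tests are the Nat tests of B
  have hd2 : decide (((c0 :: t).length : Int) > ((2:Nat) : Int)) = decide (2 < (c0 :: t).length) := by
    simp [gt_iff_lt]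
  have hd1 : decide (((c0 :: t).length : Int) > ((1:Nat) : Int)) = decide (1 < (c0 :: t).length) := by
    simp [gt_iff_lt]
  rw [hd2, hd1]
  cases t with
  | nil =>
    -- length 1: all four conditions are false; both sides return the word
    simp [pvBDecide2]
  | cons c1 t2 =>
    have hB2 : List.contains [['l','e'], ['y','e'], ['b','e'], ['k','e'], ['m','a'], ['m','e'],
         ['t','e'], ['e','n'], ['y','a']] ((c0 :: c1 :: t2).take 2) =
        pvBDecide2 (c0 :: c1 :: t2) c0 := by
      rw [show (c0 :: c1 :: t2).take 2 = [c0, c1] from rfl, pvContains2]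
      unfold pvBDecide2
      rw [pvGet1]
      simp
    have hB1 : List.contains [['e'], ['a'], ['s'], ['y']] ((c0 :: c1 :: t2).take 1) =
        List.contains ['e','a','s','y'] c0 := by
      rw [show (c0 :: c1 :: t2).take 1 = [c0] from rfl, pvContains1]
    rw [hB2, hB1, pvStep2_eq, pvStep1_eq]

-- ===== VERDICT (by name: the statement is the Claim_ definition above) =====
theorem apply_prefix_apostrophe_rules_spec : Claim_equal_apply_prefix_apostrophe_rules := by
  intro word _
  unfold Spec_apply_prefix_apostrophe_rules
  unfold apply_prefix_apostrophe_rules apply_prefix_apostrophe_rules_alt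
  cases h : word.toList with
  | nil => rfl
  | cons c0 t =>
    rw [if_neg (List.cons_ne_nil c0 t)]
    show String.ofList (pvALoop (c0 :: t)
        (PySem.List.sorted pvPrefixesA (key := fun p => PySem.Chars.len p) (reverse := true)))
      = String.ofList (pvBCore (c0 :: t) c0)
    rw [pvCore_eq]
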